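-- pv_equiv track=rewrite | github.com/Khanhsz/optimal-layout | app.py | pairwise_exchange_optimizer
-- ===== SOURCE A (Python) =====
-- from itertools import combinations
--
-- def calculate_cost(flow, dist, layout):
--     n = len(layout)
--     cost = 0
--     for i in range(n):
--         for j in range(n):
--             if i != j:
--                 cost += flow[i][j] * dist[layout[i]][layout[j]]
--     return cost
--
-- def pairwise_exchange_optimizer(flow, dist):
--     n = len(flow)
--     layout = list(range(n))
--     history = []
--     iteration = 0
--
--     while True:
--         current_cost = calculate_cost(flow, dist, layout)
--         best_cost = current_cost
--         best_layout = layout[:]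
--         history.append((iteration, layout[:], current_cost))
--
--         for i, j in combinations(range(n), 2):
--             new_layout = layout[:]
--             new_layout[i], new_layout[j] = new_layout[j], new_layout[i]
--             cost = calculate_cost(flow, dist, new_layout)
--             if cost < best_cost:
--                 best_cost = cost
--                 best_layout = new_layout[:]
--
--         if best_layout == layout:
--             break  # No improvement found
--         layout = best_layout
--         iteration += 1
--
--     return layout, best_cost, history
-- ===== SOURCE B (Python) =====
-- def calculate_cost(flow, dist, layout):
--     n = len(layout)
--     cost = 0
--     for i in range(n):
--         for j in range(n):
--             if i != j:
--                 cost += flow[i][j] * dist[layout[i]][layout[j]]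
--     return cost
--
-- def swap_delta(flow, dist, layout, i, j):
--     # exact cost change of swapping positions i and j, in O(n)
--     li, lj = layout[i], layout[j]
--     d = (flow[i][j] * (dist[lj][li] - dist[li][lj])
--          + flow[j][i] * (dist[li][lj] - dist[lj][li]))
--     for k in range(len(layout)):
--         if k != i and k != j:
--             lk = layout[k]
--             d += (flow[i][k] * (dist[lj][lk] - dist[li][lk])
--                   + flow[k][i] * (dist[lk][lj] - dist[lk][li])
--                   + flow[j][k] * (dist[li][lk] - dist[lj][lk])
--                   + flow[k][j] * (dist[lk][li] - dist[lk][lj]))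
--     return d
--
-- def pairwise_exchange_optimizer(flow, dist):
--     n = len(flow)
--     layout = list(range(n))
--     cost = calculate_cost(flow, dist, layout)
--     history = []
--     iteration = 0
--     while True:
--         history.append((iteration, layout[:], cost))
--         best_delta = 0
--         best_pair = None
--         for i in range(n - 1):
--             for j in range(i + 1, n):
--                 d = swap_delta(flow, dist, layout, i, j)
--                 if d < best_delta:
--                     best_delta = d
--                     best_pair = (i, j)
--         if best_pair is None:
--             return layout, cost, history
--         i, j = best_pair
--         layout[i], layout[j] = layout[j], layout[i]
--         cost += best_delta
--         iteration += 1
-- ===== Notes on version B (the rewrite author's own statement) =====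
-- stated objective: faster
-- what changed: Each candidate swap is scored by an exact O(n) incremental cost delta against a running cost maintained across iterations, instead of A's full O(n^2) cost recomputation for every swapped copy of the layout.
import Mathlib
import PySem

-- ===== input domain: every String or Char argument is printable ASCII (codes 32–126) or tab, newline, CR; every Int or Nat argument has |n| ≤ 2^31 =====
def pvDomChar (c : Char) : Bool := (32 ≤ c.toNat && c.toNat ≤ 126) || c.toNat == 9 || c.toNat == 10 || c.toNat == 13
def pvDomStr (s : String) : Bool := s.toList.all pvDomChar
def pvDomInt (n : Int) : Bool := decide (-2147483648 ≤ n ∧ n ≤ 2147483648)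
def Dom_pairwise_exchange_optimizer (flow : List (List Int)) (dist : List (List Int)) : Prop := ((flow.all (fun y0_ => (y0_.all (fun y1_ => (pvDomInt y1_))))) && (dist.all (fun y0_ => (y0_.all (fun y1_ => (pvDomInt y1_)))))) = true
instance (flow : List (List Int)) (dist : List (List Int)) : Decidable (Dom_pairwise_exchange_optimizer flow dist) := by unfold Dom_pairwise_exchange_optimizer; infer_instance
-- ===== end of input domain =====

-- B replaces A's full O(n^2) cost recomputation per candidate swap by an exact O(n)
-- incremental delta, keeping the running cost; same results, asymptotically faster.

-- ===== PORT A =====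
-- flow[a][b] lookup; under Pre_ every index used is in range, so getD's default is never taken
def pvF (m : List (List Int)) (a b : Nat) : Int := (m.getD a []).getD b 0
-- dist[x][y] lookup; layout entries are always the values 0..n-1 permuted, so x,y ≥ 0 and
-- toNat/getD are exact under Pre_
def pvD (m : List (List Int)) (x y : Int) : Int := (m.getD x.toNat []).getD y.toNat 0

def calculate_cost (flow : List (List Int)) (dist : List (List Int)) (layout : List Int) : Int :=
  (List.range layout.length).foldl (fun c i =>
    (List.range layout.length).foldl (fun c j =>
      if i ≠ j then c + pvF flow i j * pvD dist (layout.getD i 0) (layout.getD j 0) else c) c) 0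

-- new_layout[i], new_layout[j] = new_layout[j], new_layout[i]
def pvSwap (l : List Int) (i j : Nat) : List Int := (l.set i (l.getD j 0)).set j (l.getD i 0)

-- itertools.combinations(range(n), 2), in iteration order
def pvCombos (n : Nat) : List (Nat × Nat) :=
  (List.range n).flatMap (fun i => ((List.range n).filter (fun j => i < j)).map (fun j => (i, j)))

-- totality fuel for the `while True` loop (never exhausted: the integer cost strictly
-- decreases each iteration and is bounded by Σ|flow| · max|dist|); identical in both ports
def pvFuel (flow : List (List Int)) (dist : List (List Int)) : Nat :=
  2 * (flow.foldl (fun a r => r.foldl (fun a x => a + x.natAbs) a) 0)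
    * (dist.foldl (fun a r => r.foldl (fun a x => max a x.natAbs) a) 0) + 2

def pvLoopA (flow : List (List Int)) (dist : List (List Int)) :
    Nat → List Int → Int → List (Int × List Int × Int) → List Int × Int × (List (Int × List Int × Int))
  | 0, layout, _, history => (layout, calculate_cost flow dist layout, history)
  | fuel + 1, layout, iteration, history =>
    let current := calculate_cost flow dist layout
    let history' := history ++ [(iteration, layout, current)]
    let r := (pvCombos flow.length).foldl (fun (b : Int × List Int) p =>
        let nl := pvSwap layout p.1 p.2
        let c := calculate_cost flow dist nl
        if c < b.1 then (c, nl) else b) (current, layout)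
    if r.2 = layout then (layout, r.1, history')
    else pvLoopA flow dist fuel r.2 (iteration + 1) history'

def pairwise_exchange_optimizer (flow : List (List Int)) (dist : List (List Int)) : List Int × Int × (List (Int × List Int × Int)) :=
  pvLoopA flow dist (pvFuel flow dist) ((List.range flow.length).map (fun k : Nat => (k : Int))) 0 []

-- ===== PORT B =====
def swap_delta (flow : List (List Int)) (dist : List (List Int)) (layout : List Int) (i j : Nat) : Int :=
  let li := layout.getD i 0
  let lj := layout.getD j 0
  (List.range layout.length).foldl (fun d k =>
    if k ≠ i ∧ k ≠ j then
      let lk := layout.getD k 0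
      d + (pvF flow i k * (pvD dist lj lk - pvD dist li lk)
         + pvF flow k i * (pvD dist lk lj - pvD dist lk li)
         + pvF flow j k * (pvD dist li lk - pvD dist lj lk)
         + pvF flow k j * (pvD dist lk li - pvD dist lk lj))
    else d)
    (pvF flow i j * (pvD dist lj li - pvD dist li lj)
     + pvF flow j i * (pvD dist li lj - pvD dist lj li))

-- for i in range(n-1): for j in range(i+1, n)
def pvCombosB (n : Nat) : List (Nat × Nat) :=
  (List.range (n - 1)).flatMap (fun i => (List.range' (i + 1) (n - (i + 1))).map (fun j => (i, j)))

def pvLoopB (flow : List (List Int)) (dist : List (List Int)) :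
    Nat → List Int → Int → Int → List (Int × List Int × Int) → List Int × Int × (List (Int × List Int × Int))
  | 0, layout, cost, _, history => (layout, cost, history)
  | fuel + 1, layout, cost, iteration, history =>
    let history' := history ++ [(iteration, layout, cost)]
    let r := (pvCombosB flow.length).foldl (fun (b : Int × Option (Nat × Nat)) p =>
        let d := swap_delta flow dist layout p.1 p.2
        if d < b.1 then (d, some p) else b) (0, none)
    match r.2 with
    | none => (layout, cost, history')
    | some (i, j) => pvLoopB flow dist fuel (pvSwap layout i j) (cost + r.1) (iteration + 1) history'

def pairwise_exchange_optimizer_alt (flow : List (List Int)) (dist : List (List Int)) : List Int × Int × (List (Int × List Int × Int)) :=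
  let layout := (List.range flow.length).map (fun k : Nat => (k : Int))
  pvLoopB flow dist (pvFuel flow dist) layout (calculate_cost flow dist layout) 0 []

-- ===== PRECONDITION & SPEC =====
-- Exactly the inputs where Python A returns (no IndexError): with n = len(flow) ≥ 2, row i of
-- flow/dist is only ever indexed at positions ≠ i below n, so the last row may be one shorter.
def Pre_pairwise_exchange_optimizer (flow : List (List Int)) (dist : List (List Int)) : Prop :=
  2 ≤ flow.length →
    ((∀ i < flow.length, (if i + 1 = flow.length then flow.length - 1 else flow.length) ≤ (flow.getD i []).length)
     ∧ flow.length ≤ dist.length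
     ∧ (∀ k < flow.length, (if k + 1 = flow.length then flow.length - 1 else flow.length) ≤ (dist.getD k []).length))
instance (flow : List (List Int)) (dist : List (List Int)) : Decidable (Pre_pairwise_exchange_optimizer flow dist) := by
  unfold Pre_pairwise_exchange_optimizer; infer_instance

def pvWitness_pairwise_exchange_optimizer : List (List Int) × List (List Int) :=
  ([[0, 3], [2, 0]], [[0, 1], [1, 0]])

def Spec_pairwise_exchange_optimizer (flow : List (List Int)) (dist : List (List Int)) (out : List Int × Int × (List (Int × List Int × Int))) : Prop := out = pairwise_exchange_optimizer_alt flow dist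
instance (flow : List (List Int)) (dist : List (List Int)) (out : List Int × Int × (List (Int × List Int × Int))) : Decidable (Spec_pairwise_exchange_optimizer flow dist out) := by unfold Spec_pairwise_exchange_optimizer; infer_instance

-- ===== CLAIM (what is proved, stated in full; the proofs are below) =====
def Claim_equal_pairwise_exchange_optimizer : Prop := ∀ (flow : List (List Int)) (dist : List (List Int)), Dom_pairwise_exchange_optimizer flow dist → Pre_pairwise_exchange_optimizer flow dist → Spec_pairwise_exchange_optimizer flow dist (pairwise_exchange_optimizer flow dist)

-- ===== LEMMAS AND PROOFS =====

-- position-swap on indices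
def pvSwp (i j a : Nat) : Nat := if a = i then j else if a = j then i else a

theorem pv_witness_ok : Dom_pairwise_exchange_optimizer pvWitness_pairwise_exchange_optimizer.1 pvWitness_pairwise_exchange_optimizer.2 ∧ Pre_pairwise_exchange_optimizer pvWitness_pairwise_exchange_optimizer.1 pvWitness_pairwise_exchange_optimizer.2 := by
  constructor <;> decide

-- fold of (+ g i) over range is a sum
theorem pv_foldl_add_range (g : Nat → Int) (c : Int) (n : Nat) :
    (List.range n).foldl (fun a i => a + g i) c = c + ∑ i ∈ Finset.range n, g i := by
  induction n generalizing c with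
  | zero => simp
  | succ m ih => rw [List.range_succ, List.foldl_append, ih, Finset.sum_range_succ]; simp [add_assoc]

-- fold with a guarded add is a sum of an ite
theorem pv_foldl_ite_range (P : Nat → Prop) [DecidablePred P] (g : Nat → Int) (c : Int) (n : Nat) :
    (List.range n).foldl (fun a i => if P i then a + g i else a) c
      = c + ∑ i ∈ Finset.range n, (if P i then g i else 0) := by
  have h : (fun (a : Int) (i : Nat) => if P i then a + g i else a)
      = (fun a i => a + (if P i then g i else 0)) := by
    funext a i; split <;> simp
  rw [h, pv_foldl_add_range]

theorem pv_cost_sum (flow dist : List (List Int)) (l : List Int) :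
    calculate_cost flow dist l
      = ∑ a ∈ Finset.range l.length, ∑ b ∈ Finset.range l.length,
          (if a ≠ b then pvF flow a b * pvD dist (l.getD a 0) (l.getD b 0) else 0) := by
  unfold calculate_cost
  have h : (fun (c : Int) (i : Nat) =>
      (List.range l.length).foldl (fun c j =>
        if i ≠ j then c + pvF flow i j * pvD dist (l.getD i 0) (l.getD j 0) else c) c)
      = (fun c i => c + ∑ b ∈ Finset.range l.length,
          (if i ≠ b then pvF flow i b * pvD dist (l.getD i 0) (l.getD b 0) else 0)) := by
    funext c i
    exact pv_foldl_ite_range (fun j => i ≠ j) _ c l.length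
  rw [h, pv_foldl_add_range]
  simp

theorem pv_delta_sum (flow dist : List (List Int)) (l : List Int) (i j : Nat) :
    swap_delta flow dist l i j
      = (pvF flow i j * (pvD dist (l.getD j 0) (l.getD i 0) - pvD dist (l.getD i 0) (l.getD j 0))
         + pvF flow j i * (pvD dist (l.getD i 0) (l.getD j 0) - pvD dist (l.getD j 0) (l.getD i 0)))
        + ∑ k ∈ Finset.range l.length,
            (if k ≠ i ∧ k ≠ j then
              (pvF flow i k * (pvD dist (l.getD j 0) (l.getD k 0) - pvD dist (l.getD i 0) (l.getD k 0))
               + pvF flow k i * (pvD dist (l.getD k 0) (l.getD j 0) - pvD dist (l.getD k 0) (l.getD i 0))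
               + pvF flow j k * (pvD dist (l.getD i 0) (l.getD k 0) - pvD dist (l.getD j 0) (l.getD k 0))
               + pvF flow k j * (pvD dist (l.getD k 0) (l.getD i 0) - pvD dist (l.getD k 0) (l.getD j 0)))
             else 0) := by
  unfold swap_delta
  exact pv_foldl_ite_range (fun k => k ≠ i ∧ k ≠ j) _ _ l.length

theorem pv_swap_len (l : List Int) (i j : Nat) : (pvSwap l i j).length = l.length := by
  simp [pvSwap]

theorem pv_swap_getD (l : List Int) (i j : Nat) (hi : i < l.length) (hj : j < l.length) (a : Nat) :
    (pvSwap l i j).getD a 0 = l.getD (pvSwp i j a) 0 := by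
  unfold pvSwap pvSwp
  by_cases haj : a = j
  · subst haj
    by_cases hai : a = i
    · subst hai
      simp [List.getD_eq_getElem?_getD, hi]
    · simp [List.getD_eq_getElem?_getD, hai, hj]
  · by_cases hai : a = i
    · subst hai
      simp [List.getD_eq_getElem?_getD, Ne.symm haj, hi]
    · simp [List.getD_eq_getElem?_getD, Ne.symm haj, Ne.symm hai, hai, haj]

-- the double-sum rearrangement behind the O(n) delta
theorem pv_sum_rearrange (n i j : Nat) (hij : i ≠ j) (hi : i < n) (hj : j < n)
    (G G' : Nat → Nat → Int)
    (hoff : ∀ a b, a ≠ i → a ≠ j → b ≠ i → b ≠ j → G' a b = G a b) :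
    (∑ a ∈ Finset.range n, ∑ b ∈ Finset.range n, (if a ≠ b then G' a b else 0))
      = (∑ a ∈ Finset.range n, ∑ b ∈ Finset.range n, (if a ≠ b then G a b else 0))
        + ((G' i j - G i j) + (G' j i - G j i)
           + ∑ k ∈ Finset.range n,
              (if k ≠ i ∧ k ≠ j then
                (G' i k - G i k) + (G' k i - G k i) + (G' j k - G j k) + (G' k j - G k j)
               else 0)) := by
  set s := Finset.range n with hs
  set R := (s.erase i).erase j with hR
  have his : i ∈ s := Finset.mem_range.mpr hi
  have hjs : j ∈ s := Finset.mem_range.mpr hj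
  have hji : j ∈ s.erase i := Finset.mem_erase.mpr ⟨Ne.symm hij, hjs⟩
  have hmemR : ∀ a, a ∈ R ↔ (a ∈ s ∧ a ≠ i ∧ a ≠ j) := by
    intro a; simp [hR, Finset.mem_erase]; tauto
  set D : Nat → Nat → Int := fun a b => (if a ≠ b then G' a b else 0) - (if a ≠ b then G a b else 0) with hD
  have hDoff : ∀ a b, a ≠ i → a ≠ j → b ≠ i → b ≠ j → D a b = 0 := by
    intro a b h1 h2 h3 h4
    have : G' a b = G a b := hoff a b h1 h2 h3 h4
    simp [hD, this]
  have hDdiag : ∀ a, D a a = 0 := by intro a; simp [hD]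
  have hDval : ∀ a b, a ≠ b → D a b = G' a b - G a b := by
    intro a b hab; simp [hD, hab]
  have split : ∀ f : Nat → Int, ∑ a ∈ s, f a = f i + f j + ∑ a ∈ R, f a := by
    intro f
    rw [← Finset.add_sum_erase s f his, ← Finset.add_sum_erase (s.erase i) f hji, ← hR]
    ring
  have key : (∑ a ∈ s, ∑ b ∈ s, (if a ≠ b then G' a b else 0))
      = (∑ a ∈ s, ∑ b ∈ s, (if a ≠ b then G a b else 0)) + ∑ a ∈ s, ∑ b ∈ s, D a b := by
    rw [← Finset.sum_add_distrib]
    refine Finset.sum_congr rfl (fun a _ => ?_)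
    rw [← Finset.sum_add_distrib]
    refine Finset.sum_congr rfl (fun b _ => ?_)
    simp [hD]
  rw [key]
  congr 1
  have inner_i : ∑ b ∈ s, D i b = D i j + ∑ b ∈ R, D i b := by
    rw [split (fun b => D i b), hDdiag i]; ring
  have inner_j : ∑ b ∈ s, D j b = D j i + ∑ b ∈ R, D j b := by
    rw [split (fun b => D j b), hDdiag j]; ring
  have inner_R : ∀ a ∈ R, ∑ b ∈ s, D a b = D a i + D a j := by
    intro a haR
    rcases (hmemR a).mp haR with ⟨has, hai, haj⟩
    rw [split (fun b => D a b)]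
    have hz : ∑ b ∈ R, D a b = 0 := by
      refine Finset.sum_eq_zero (fun b hbR => ?_)
      rcases (hmemR b).mp hbR with ⟨_, hbi, hbj⟩
      exact hDoff a b hai haj hbi hbj
    rw [hz]; ring
  have dbl : ∑ a ∈ s, ∑ b ∈ s, D a b
      = D i j + D j i + ∑ a ∈ R, (D i a + D j a + D a i + D a j) := by
    rw [split (fun a => ∑ b ∈ s, D a b), inner_i, inner_j,
        Finset.sum_congr rfl inner_R]
    simp only [Finset.sum_add_distrib]
    ring
  have tail : ∑ k ∈ s, (if k ≠ i ∧ k ≠ j then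
        (G' i k - G i k) + (G' k i - G k i) + (G' j k - G j k) + (G' k j - G k j) else 0)
      = ∑ a ∈ R, (D i a + D j a + D a i + D a j) := by
    rw [split, if_neg (by simp [hij]), if_neg (by simp [Ne.symm hij])]
    rw [zero_add, zero_add]
    refine Finset.sum_congr rfl (fun a haR => ?_)
    rcases (hmemR a).mp haR with ⟨_, hai, haj⟩
    rw [if_pos ⟨hai, haj⟩, hDval i a (Ne.symm hai), hDval j a (Ne.symm haj),
        hDval a i hai, hDval a j haj]
    ring
  rw [dbl, tail, hDval i j hij, hDval j i (Ne.symm hij)]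

-- cost of a swapped layout = cost + delta
theorem pv_delta (flow dist : List (List Int)) (l : List Int) (i j : Nat)
    (hij : i ≠ j) (hi : i < l.length) (hj : j < l.length) :
    calculate_cost flow dist (pvSwap l i j)
      = calculate_cost flow dist l + swap_delta flow dist l i j := by
  have hlen : (pvSwap l i j).length = l.length := pv_swap_len l i j
  have hget : ∀ a, (pvSwap l i j).getD a 0 = l.getD (pvSwp i j a) 0 := pv_swap_getD l i j hi hj
  rw [pv_cost_sum, pv_cost_sum, pv_delta_sum, hlen]
  have hcongr : (∑ a ∈ Finset.range l.length, ∑ b ∈ Finset.range l.length,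
        (if a ≠ b then pvF flow a b * pvD dist ((pvSwap l i j).getD a 0) ((pvSwap l i j).getD b 0) else 0))
      = ∑ a ∈ Finset.range l.length, ∑ b ∈ Finset.range l.length,
        (if a ≠ b then pvF flow a b * pvD dist (l.getD (pvSwp i j a) 0) (l.getD (pvSwp i j b) 0) else 0) := by
    refine Finset.sum_congr rfl (fun a _ => Finset.sum_congr rfl (fun b _ => ?_))
    rw [hget a, hget b]
  rw [hcongr]
  rw [pv_sum_rearrange l.length i j hij hi hj
      (fun a b => pvF flow a b * pvD dist (l.getD a 0) (l.getD b 0))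
      (fun a b => pvF flow a b * pvD dist (l.getD (pvSwp i j a) 0) (l.getD (pvSwp i j b) 0))
      (by intro a b h1 h2 h3 h4; simp [pvSwp, h1, h2, h3, h4])]
  congr 1
  have hii : pvSwp i j i = j := by simp [pvSwp]
  have hjj : pvSwp i j j = i := by simp [pvSwp, Ne.symm hij]
  congr 1
  · rw [hii, hjj]; ring
  · refine Finset.sum_congr rfl (fun k _ => ?_)
    by_cases hk : k ≠ i ∧ k ≠ j
    · rw [if_pos hk, if_pos hk]
      have hkk : pvSwp i j k = k := by simp [pvSwp, hk.1, hk.2]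
      rw [hii, hjj, hkk]; ring
    · rw [if_neg hk, if_neg hk]

def pvDistinct (l : List Int) : Prop :=
  ∀ a b, a < l.length → b < l.length → a ≠ b → l.getD a 0 ≠ l.getD b 0

theorem pv_swp_lt (i j a n : Nat) (hi : i < n) (hj : j < n) (ha : a < n) : pvSwp i j a < n := by
  unfold pvSwp; split_ifs <;> omega

theorem pv_swp_inj (i j a b : Nat) (hab : a ≠ b) : pvSwp i j a ≠ pvSwp i j b := by
  unfold pvSwp; split_ifs <;> omega

theorem pv_swap_distinct (l : List Int) (i j : Nat) (hi : i < l.length) (hj : j < l.length)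
    (h : pvDistinct l) : pvDistinct (pvSwap l i j) := by
  intro a b ha hb hab
  rw [pv_swap_len] at ha hb
  rw [pv_swap_getD l i j hi hj a, pv_swap_getD l i j hi hj b]
  exact h _ _ (pv_swp_lt i j a _ hi hj ha) (pv_swp_lt i j b _ hi hj hb) (pv_swp_inj i j a b hab)

theorem pv_swap_ne (l : List Int) (i j : Nat) (hij : i ≠ j) (hi : i < l.length) (hj : j < l.length)
    (h : pvDistinct l) : pvSwap l i j ≠ l := by
  intro heq
  have : (pvSwap l i j).getD i 0 = l.getD i 0 := by rw [heq]
  rw [pv_swap_getD l i j hi hj i] at this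
  have hii : pvSwp i j i = j := by simp [pvSwp]
  rw [hii] at this
  exact h j i hj hi (Ne.symm hij) this

theorem pv_filter_range (n i : Nat) :
    (List.range n).filter (fun j => i < j) = List.range' (i + 1) (n - (i + 1)) := by
  induction n with
  | zero => simp
  | succ m ih =>
    rw [List.range_succ, List.filter_append, ih]
    by_cases h : i < m
    · have : m + 1 - (i + 1) = (m - (i + 1)) + 1 := by omega
      rw [this, List.range'_concat]
      simp only [List.filter_cons, List.filter_nil]
      rw [if_pos (by simpa using h)]
      congr 2
      omega
    · have h1 : m + 1 - (i + 1) = m - (i + 1) := by omega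
      simp only [List.filter_cons, List.filter_nil]
      rw [if_neg (by simpa using h), h1, List.append_nil]

theorem pv_combos_eq (n : Nat) : pvCombosB n = pvCombos n := by
  rcases Nat.eq_zero_or_pos n with h0 | hpos
  · subst h0; rfl
  · obtain ⟨m, rfl⟩ : ∃ m, n = m + 1 := ⟨n - 1, by omega⟩
    unfold pvCombosB pvCombos
    rw [List.range_succ, List.flatMap_append]
    have hlast : (((List.range m ++ [m]).filter (fun j => m < j)).map (fun j => ((m : Nat), j))) = [] := by
      have h1 : (List.range m).filter (fun j => m < j) = [] := by
        rw [pv_filter_range]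
        have : m - (m + 1) = 0 := by omega
        rw [this]; rfl
      rw [List.filter_append, h1]
      simp
    simp only [List.flatMap_cons, List.flatMap_nil, hlast, List.append_nil,
      Nat.add_sub_cancel]
    exact List.flatMap_congr (fun i _ => by rw [← List.range_succ, pv_filter_range])

theorem pv_combos_mem (n : Nat) (p : Nat × Nat) (hp : p ∈ pvCombos n) :
    p.1 ≠ p.2 ∧ p.1 < n ∧ p.2 < n := by
  unfold pvCombos at hp
  simp only [List.mem_flatMap, List.mem_map, List.mem_filter, List.mem_range] at hp
  rcases hp with ⟨i, hi, j, ⟨hjn, hij⟩, rfl⟩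
  simp at hij ⊢
  omega

-- invariant tying A's (best_cost, best_layout) scan to B's (best_delta, best_pair) scan
def pvInv (flow dist : List (List Int)) (l : List Int)
    (sA : Int × List Int) (sB : Int × Option (Nat × Nat)) : Prop :=
  sA.1 = calculate_cost flow dist l + sB.1 ∧
  ((sB.2 = none ∧ sA.2 = l ∧ sB.1 = 0)
   ∨ (∃ i j, sB.2 = some (i, j) ∧ i ≠ j ∧ i < l.length ∧ j < l.length
       ∧ sA.2 = pvSwap l i j ∧ sB.1 = swap_delta flow dist l i j))

theorem pv_fold_corr (flow dist : List (List Int)) (l : List Int) :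
    ∀ (L : List (Nat × Nat)), (∀ p ∈ L, p.1 ≠ p.2 ∧ p.1 < l.length ∧ p.2 < l.length) →
    ∀ (sA : Int × List Int) (sB : Int × Option (Nat × Nat)), pvInv flow dist l sA sB →
    pvInv flow dist l
      (L.foldl (fun (b : Int × List Int) p =>
        let nl := pvSwap l p.1 p.2
        let c := calculate_cost flow dist nl
        if c < b.1 then (c, nl) else b) sA)
      (L.foldl (fun (b : Int × Option (Nat × Nat)) p =>
        let d := swap_delta flow dist l p.1 p.2
        if d < b.1 then (d, some p) else b) sB) := by
  intro L
  induction L with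
  | nil => intro _ sA sB h; exact h
  | cons p L ih =>
    intro hL sA sB hinv
    rcases hL p (List.mem_cons_self) with ⟨hij, hi, hj⟩
    simp only [List.foldl_cons]
    refine ih (fun q hq => hL q (List.mem_cons_of_mem p hq)) _ _ ?_
    show pvInv flow dist l
      (if calculate_cost flow dist (pvSwap l p.1 p.2) < sA.1
        then (calculate_cost flow dist (pvSwap l p.1 p.2), pvSwap l p.1 p.2) else sA)
      (if swap_delta flow dist l p.1 p.2 < sB.1
        then (swap_delta flow dist l p.1 p.2, some p) else sB)
    rcases hinv with ⟨hcost, hrel⟩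
    have hdelta := pv_delta flow dist l p.1 p.2 hij hi hj
    by_cases hlt : swap_delta flow dist l p.1 p.2 < sB.1
    · rw [if_pos hlt, if_pos (by rw [hdelta, hcost]; omega)]
      exact ⟨by rw [hdelta], Or.inr ⟨p.1, p.2, by simp, hij, hi, hj, rfl, rfl⟩⟩
    · rw [if_neg hlt, if_neg (by rw [hdelta, hcost]; omega)]
      exact ⟨hcost, hrel⟩

theorem pv_loop_corr (flow dist : List (List Int)) (fuel : Nat) :
    ∀ (l : List Int) (it : Int) (h : List (Int × List Int × Int)),
      l.length = flow.length → pvDistinct l →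
      pvLoopA flow dist fuel l it h = pvLoopB flow dist fuel l (calculate_cost flow dist l) it h := by
  induction fuel with
  | zero => intro l it h _ _; rfl
  | succ fuel ih =>
    intro l it h hlen hdist
    have hL : ∀ p ∈ pvCombos flow.length, p.1 ≠ p.2 ∧ p.1 < l.length ∧ p.2 < l.length := by
      intro p hp
      have := pv_combos_mem flow.length p hp
      omega
    have hinv := pv_fold_corr flow dist l (pvCombos flow.length) hL
      (calculate_cost flow dist l, l) (0, none) ⟨by simp, Or.inl ⟨rfl, rfl, rfl⟩⟩
    show (let current := calculate_cost flow dist l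
          let history' := h ++ [(it, l, current)]
          let r := (pvCombos flow.length).foldl (fun (b : Int × List Int) p =>
              let nl := pvSwap l p.1 p.2
              let c := calculate_cost flow dist nl
              if c < b.1 then (c, nl) else b) (current, l)
          if r.2 = l then (l, r.1, history')
          else pvLoopA flow dist fuel r.2 (it + 1) history')
        = (let history' := h ++ [(it, l, calculate_cost flow dist l)]
           let r := (pvCombosB flow.length).foldl (fun (b : Int × Option (Nat × Nat)) p =>
               let d := swap_delta flow dist l p.1 p.2
               if d < b.1 then (d, some p) else b) (0, none)
           match r.2 with
           | none => (l, calculate_cost flow dist l, history')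
           | some (i, j) => pvLoopB flow dist fuel (pvSwap l i j) (calculate_cost flow dist l + r.1) (it + 1) history')
    simp only [pv_combos_eq]
    rcases hinv with ⟨hcost, hrel | hrel⟩
    · rcases hrel with ⟨hB2, hA2, hB1⟩
      rw [hA2, hB2]
      rw [hB1, add_zero] at hcost
      simp [hcost]
    · rcases hrel with ⟨i, j, hB2, hij, hi, hj, hA2, hB1⟩
      rw [hB2, hA2, if_neg (pv_swap_ne l i j hij hi hj hdist)]
      have hrec := ih (pvSwap l i j) (it + 1) (h ++ [(it, l, calculate_cost flow dist l)])
        (by rw [pv_swap_len]; exact hlen) (pv_swap_distinct l i j hi hj hdist)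
      rw [hrec]
      have hd : calculate_cost flow dist (pvSwap l i j)
          = calculate_cost flow dist l + swap_delta flow dist l i j := pv_delta flow dist l i j hij hi hj
      rw [hd, ← hB1]

theorem pv_range_getD (n a : Nat) (ha : a < n) :
    ((List.range n).map (fun k : Nat => (k : Int))).getD a 0 = (a : Int) := by
  rw [List.getD_eq_getElem _ _ (by simpa using ha), List.getElem_map, List.getElem_range]

-- ===== VERDICT (by name: the statement is the Claim_ definition above) =====
theorem pairwise_exchange_optimizer_spec : Claim_equal_pairwise_exchange_optimizer := by
  intro flow dist _ _
  unfold Spec_pairwise_exchange_optimizer pairwise_exchange_optimizer pairwise_exchange_optimizer_alt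
  apply pv_loop_corr
  · simp
  · intro a b ha hb hab
    simp only [List.length_map, List.length_range] at ha hb
    rw [pv_range_getD _ _ ha, pv_range_getD _ _ hb]
    exact_mod_cast hab
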